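-- pv_equiv track=rewrite | github.com/mikotran3012/BJ-Tracker | ui/input_panels/base_card_panel.py | _has_usable_ace
-- ===== SOURCE A (Python) =====
-- def _has_usable_ace(hand):
--     """Check if hand has usable ace - SHARED logic."""
--     total = 0
--     aces = 0
--
--     for rank, suit in hand:
--         if rank in ['J', 'Q', 'K']:
--             total += 10
--         elif rank in ['T', '10']:
--             total += 10
--         elif rank == 'A':
--             aces += 1
--             total += 11
--         else:
--             total += int(rank)
--
--     while total > 21 and aces > 0:
--         total -= 10
--         aces -= 1
--
--     return aces > 0
-- ===== SOURCE B (Python) =====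
-- def _has_usable_ace(hand):
--     """Check if hand has usable ace - closed-form test, no demotion loop."""
--     hard = 0
--     aces = 0
--     for rank, suit in hand:
--         if rank == 'A':
--             aces += 1
--             hard += 1
--         elif rank in ('J', 'Q', 'K', 'T', '10'):
--             hard += 10
--         else:
--             hard += int(rank)
--     return aces > 0 and hard + 10 <= 21
-- ===== Notes on version B (the rewrite author's own statement) =====
-- stated objective: simpler
-- what changed: Replaces A's 'count aces as 11 then demote in a while loop' strategy with a single pass computing the hard total (aces as 1) and an ace count, returning the closed-form test aces > 0 and hard + 10 <= 21.
import Mathlib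
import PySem

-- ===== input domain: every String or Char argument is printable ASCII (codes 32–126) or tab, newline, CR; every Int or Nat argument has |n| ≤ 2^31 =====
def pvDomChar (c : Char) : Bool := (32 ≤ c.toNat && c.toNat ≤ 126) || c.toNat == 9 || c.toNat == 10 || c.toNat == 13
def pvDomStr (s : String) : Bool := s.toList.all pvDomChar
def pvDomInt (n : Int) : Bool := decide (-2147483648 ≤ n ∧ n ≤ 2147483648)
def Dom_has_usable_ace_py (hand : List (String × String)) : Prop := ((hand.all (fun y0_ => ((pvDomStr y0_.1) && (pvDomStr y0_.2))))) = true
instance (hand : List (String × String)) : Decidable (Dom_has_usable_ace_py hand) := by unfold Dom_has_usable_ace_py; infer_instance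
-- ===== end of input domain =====

-- B replaces A's "count aces as 11 then demote in a while loop" strategy with one pass
-- computing the hard total and an ace count plus the closed-form test aces > 0 && hard + 10 <= 21.


-- ===== PORT A =====
-- the for-loop: threads (total, aces); none = int(rank) raised ValueError
def hua_aLoop (hand : List (String × String)) (total aces : Int) : Option (Int × Int) :=
  match hand with
  | [] => some (total, aces)
  | (rank, _) :: rest =>
    if rank = "J" ∨ rank = "Q" ∨ rank = "K" then hua_aLoop rest (total + 10) aces
    else if rank = "T" ∨ rank = "10" then hua_aLoop rest (total + 10) aces
    else if rank = "A" then hua_aLoop rest (total + 11) (aces + 1)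
    else match PySem.Int.ofStr? rank with
      | none => none
      | some v => hua_aLoop rest (total + v) aces

-- the while-loop: demote aces while busting
def hua_aWhile (total aces : Int) : Int × Int :=
  if h : total > 21 ∧ aces > 0 then hua_aWhile (total - 10) (aces - 1)
  else (total, aces)
termination_by aces.toNat
decreasing_by omega

def has_usable_ace_py (hand : List (String × String)) : Bool :=
  match hua_aLoop hand 0 0 with
  | none => false   -- Python raises here; excluded by Pre_
  | some (t, a) => decide ((hua_aWhile t a).2 > 0)

-- ===== PORT B =====
def hua_bLoop (hand : List (String × String)) (hard aces : Int) : Option (Int × Int) :=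
  match hand with
  | [] => some (hard, aces)
  | (rank, _) :: rest =>
    if rank = "A" then hua_bLoop rest (hard + 1) (aces + 1)
    else if rank = "J" ∨ rank = "Q" ∨ rank = "K" ∨ rank = "T" ∨ rank = "10" then
      hua_bLoop rest (hard + 10) aces
    else match PySem.Int.ofStr? rank with
      | none => none
      | some v => hua_bLoop rest (hard + v) aces

def has_usable_ace_py_alt (hand : List (String × String)) : Bool :=
  match hua_bLoop hand 0 0 with
  | none => false
  | some (h, a) => decide (a > 0 ∧ h + 10 ≤ 21)

-- ===== PRECONDITION & SPEC =====
-- Pre_ excludes exactly the hands on which int(rank) raises ValueError in both programs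
def Pre_has_usable_ace_py (hand : List (String × String)) : Prop :=
  ∀ p ∈ hand, p.1 ∈ (["J", "Q", "K", "T", "10", "A"] : List String) ∨ (PySem.Int.ofStr? p.1).isSome
instance (hand : List (String × String)) : Decidable (Pre_has_usable_ace_py hand) := by unfold Pre_has_usable_ace_py; infer_instance

def pvWitness_has_usable_ace_py : (List (String × String)) := [("A", "s"), ("7", "h")]

def Spec_has_usable_ace_py (hand : List (String × String)) (out : Bool) : Prop := out = has_usable_ace_py_alt hand
instance (hand : List (String × String)) (out : Bool) : Decidable (Spec_has_usable_ace_py hand out) := by unfold Spec_has_usable_ace_py; infer_instance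

-- ===== CLAIM (what is proved, stated in full; the proofs are below) =====
def Claim_equal_has_usable_ace_py : Prop := ∀ (hand : List (String × String)), Dom_has_usable_ace_py hand → Pre_has_usable_ace_py hand → Spec_has_usable_ace_py hand (has_usable_ace_py hand)

-- ===== LEMMAS AND PROOFS =====

-- the while loop's final ace count is positive iff an ace can stay 11: closed form
lemma hua_aWhile_char (t a : Int) (ha : 0 ≤ a) :
    ((hua_aWhile t a).2 > 0) ↔ (0 < a ∧ t - 10 * a + 10 ≤ 21) := by
  induction t, a using hua_aWhile.induct with
  | case1 t a h ih =>
    rw [hua_aWhile, dif_pos h]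
    rw [ih (by omega)]
    omega
  | case2 t a h =>
    rw [hua_aWhile, dif_neg h]
    simp only [gt_iff_lt]
    omega

-- A's loop state relates to B's: total = hard + 10 * aces throughout
lemma hua_loop_rel (hand : List (String × String)) (h a : Int) :
    hua_aLoop hand (h + 10 * a) a = (hua_bLoop hand h a).map (fun p => (p.1 + 10 * p.2, p.2)) := by
  induction hand generalizing h a with
  | nil => simp [hua_aLoop, hua_bLoop]
  | cons x rest ih =>
    obtain ⟨rank, suit⟩ := x
    by_cases hA : rank = "A"
    · have hJ : ¬(rank = "J" ∨ rank = "Q" ∨ rank = "K") := by subst hA; decide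
      have hT : ¬(rank = "T" ∨ rank = "10") := by subst hA; decide
      simp only [hua_aLoop, hua_bLoop, if_neg hJ, if_neg hT, if_pos hA]
      rw [show h + 10 * a + 11 = (h + 1) + 10 * (a + 1) by ring]
      exact ih _ _
    · by_cases h10 : rank = "J" ∨ rank = "Q" ∨ rank = "K" ∨ rank = "T" ∨ rank = "10"
      · rcases h10 with h1 | h1 | h1 | h1 | h1 <;> subst h1 <;>
          simp only [hua_aLoop, hua_bLoop] <;>
          first
          | (rw [if_pos (by decide), if_neg (by decide), if_pos (by decide)];
             rw [show h + 10 * a + 10 = (h + 10) + 10 * a by ring]; exact ih _ _)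
          | (rw [if_neg (by decide), if_pos (by decide), if_neg (by decide), if_pos (by decide)];
             rw [show h + 10 * a + 10 = (h + 10) + 10 * a by ring]; exact ih _ _)
      · have hJ : ¬(rank = "J" ∨ rank = "Q" ∨ rank = "K") := by tauto
        have hT : ¬(rank = "T" ∨ rank = "10") := by tauto
        simp only [hua_aLoop, hua_bLoop, if_neg hA, if_neg hJ, if_neg hT, if_neg h10]
        cases PySem.Int.ofStr? rank with
        | none => simp
        | some v =>
          simp only
          rw [show h + 10 * a + v = (h + v) + 10 * a by ring]
          exact ih _ _

-- the ace count never decreases in B's loop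
lemma hua_bLoop_aces_nonneg (hand : List (String × String)) (h a : Int) (ha : 0 ≤ a)
    {h' a' : Int} (heq : hua_bLoop hand h a = some (h', a')) : 0 ≤ a' := by
  induction hand generalizing h a with
  | nil => simp [hua_bLoop] at heq; omega
  | cons x rest ih =>
    obtain ⟨rank, suit⟩ := x
    simp only [hua_bLoop] at heq
    split_ifs at heq with h1 h2
    · exact ih (h + 1) (a + 1) (by omega) heq
    · exact ih (h + 10) a ha heq
    · cases hv : PySem.Int.ofStr? rank with
      | none => rw [hv] at heq; simp at heq
      | some v => rw [hv] at heq; exact ih (h + v) a ha heq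

-- Pre_ means B's loop returns a value
lemma hua_bLoop_isSome (hand : List (String × String))
    (hpre : ∀ p ∈ hand, p.1 ∈ (["J", "Q", "K", "T", "10", "A"] : List String) ∨ (PySem.Int.ofStr? p.1).isSome)
    (h a : Int) : (hua_bLoop hand h a).isSome := by
  induction hand generalizing h a with
  | nil => simp [hua_bLoop]
  | cons x rest ih =>
    obtain ⟨rank, suit⟩ := x
    have hx := hpre (rank, suit) (by simp)
    have hrest : ∀ p ∈ rest, p.1 ∈ (["J", "Q", "K", "T", "10", "A"] : List String) ∨ (PySem.Int.ofStr? p.1).isSome :=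
      fun p hp => hpre p (by simp [hp])
    simp only [hua_bLoop]
    split_ifs with h1 h2
    · exact ih hrest _ _
    · exact ih hrest _ _
    · cases hv : PySem.Int.ofStr? rank with
      | none =>
        exfalso
        rcases hx with hmem | h'
        · simp only [List.mem_cons, List.not_mem_nil, or_false] at hmem
          tauto
        · rw [hv] at h'; simp at h'
      | some v => exact ih hrest _ _

-- ===== VERDICT (by name: the statement is the Claim_ definition above) =====
theorem has_usable_ace_py_spec : Claim_equal_has_usable_ace_py := by
  intro hand _ hpre
  unfold Spec_has_usable_ace_py has_usable_ace_py has_usable_ace_py_alt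
  have hsome := hua_bLoop_isSome hand hpre 0 0
  cases hb : hua_bLoop hand 0 0 with
  | none => rw [hb] at hsome; simp at hsome
  | some p =>
    obtain ⟨h, a⟩ := p
    have ha : 0 ≤ a := hua_bLoop_aces_nonneg hand 0 0 (by omega) hb
    have hrel := hua_loop_rel hand 0 0
    rw [hb] at hrel
    simp only [Option.map_some] at hrel
    rw [show (0 : Int) + 10 * 0 = 0 by ring] at hrel
    rw [hrel]
    rw [decide_eq_decide, hua_aWhile_char _ _ ha]
    constructor <;> intro hh <;> exact ⟨hh.1, by omega⟩
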